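-- pv_equiv track=rewrite | github.com/othyagen/scribe-local | app/normalize.py | _split_punct
-- ===== SOURCE A (Python) =====
-- from typing import Any, Dict, List, Tuple
--
-- def _split_punct(token: str) -> Tuple[str, str, str]:
--     """Split a token into (leading_punct, core, trailing_punct)."""
--     i = 0
--     while i < len(token) and not token[i].isalnum():
--         i += 1
--     j = len(token)
--     while j > i and not token[j - 1].isalnum():
--         j -= 1
--     return token[:i], token[i:j], token[j:]
-- ===== SOURCE B (Python) =====
-- def _split_punct(token: str):
--     """Split a token into (leading_punct, core, trailing_punct)."""
--     idx = [k for k in range(len(token)) if token[k].isalnum()]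
--     if not idx:
--         return token, "", ""
--     i, j = idx[0], idx[-1] + 1
--     return token[:i], token[i:j], token[j:]
-- ===== Notes on version B (the rewrite author's own statement) =====
-- stated objective: alternative
-- what changed: Replaces the two inward-scanning while loops with one forward pass that collects all alphanumeric indices and slices at the minimum and maximum of that list.
import Mathlib
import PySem

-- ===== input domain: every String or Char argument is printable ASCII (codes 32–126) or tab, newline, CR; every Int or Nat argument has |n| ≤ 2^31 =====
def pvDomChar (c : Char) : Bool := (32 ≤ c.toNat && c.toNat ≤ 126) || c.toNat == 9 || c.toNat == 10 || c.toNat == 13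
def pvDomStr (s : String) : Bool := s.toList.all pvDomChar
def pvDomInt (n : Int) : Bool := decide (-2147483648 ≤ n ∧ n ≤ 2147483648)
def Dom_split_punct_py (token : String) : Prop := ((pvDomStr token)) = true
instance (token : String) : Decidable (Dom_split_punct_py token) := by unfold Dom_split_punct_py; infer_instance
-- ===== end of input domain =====

-- B replaces A's two inward-scanning while loops by one forward pass collecting all
-- alphanumeric indices and slicing at that list's extremes (alternative decomposition).

-- ===== PORT A =====
-- first while loop: i = 0; while i < len(token) and not token[i].isalnum(): i += 1
def pvLoopI : List Char → Nat
  | [] => 0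
  | c :: cs => if PySem.Chars.isalnum c then 0 else pvLoopI cs + 1

-- second while loop: j = len(token); while j > i and not token[j-1].isalnum(): j -= 1
-- (token[j-1] with i < j ≤ len is a safe in-range access; getD is exact there)
def pvLoopJ (cs : List Char) (i : Nat) : Nat → Nat
  | 0 => 0
  | j + 1 => if i < j + 1 ∧ ¬ PySem.Chars.isalnum (cs.getD j ' ') then pvLoopJ cs i j else j + 1

-- slices token[:i], token[i:j], token[j:] with 0 ≤ i ≤ j ≤ len are exactly take/drop
def split_punct_py (token : String) : String × String × String :=
  let cs := token.toList
  let i := pvLoopI cs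
  let j := pvLoopJ cs i cs.length
  (String.ofList (cs.take i), String.ofList ((cs.take j).drop i), String.ofList (cs.drop j))

-- ===== PORT B =====
-- idx = [k for k in range(len(token)) if token[k].isalnum()]  (token[k] with k in range is in range; getD is exact)
def split_punct_py_alt (token : String) : String × String × String :=
  let cs := token.toList
  let idx := (List.range cs.length).filter (fun k => PySem.Chars.isalnum (cs.getD k ' '))
  match idx with
  | [] => (token, "", "")
  | i :: rest =>
      let j := rest.getLastD i + 1   -- idx[-1] + 1
      (String.ofList (cs.take i), String.ofList ((cs.take j).drop i), String.ofList (cs.drop j))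

-- ===== PRECONDITION & SPEC =====
def Spec_split_punct_py (token : String) (out : String × String × String) : Prop := out = split_punct_py_alt token
instance (token : String) (out : String × String × String) : Decidable (Spec_split_punct_py token out) := by unfold Spec_split_punct_py; infer_instance

-- ===== CLAIM (what is proved, stated in full; the proofs are below) =====
def Claim_equal_split_punct_py : Prop := ∀ (token : String), Dom_split_punct_py token → Spec_split_punct_py token (split_punct_py token)

-- ===== LEMMAS AND PROOFS =====

theorem pvLoopI_all (cs : List Char) (h : ∀ c ∈ cs, PySem.Chars.isalnum c = false) :
    pvLoopI cs = cs.length := by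
  induction cs with
  | nil => rfl
  | cons c cs ih =>
      simp only [pvLoopI, h c (by simp), Bool.false_eq_true, if_false, List.length_cons]
      exact congrArg (· + 1) (ih (fun d hd => h d (by simp [hd])))

theorem pvLoopI_first (cs : List Char) (k : Nat) (hk : k < cs.length)
    (hP : PySem.Chars.isalnum (cs.getD k ' ') = true)
    (hmin : ∀ m < k, PySem.Chars.isalnum (cs.getD m ' ') = false) :
    pvLoopI cs = k := by
  induction cs generalizing k with
  | nil => simp at hk
  | cons c cs ih =>
      cases k with
      | zero => simp_all [pvLoopI]
      | succ k' =>
          have hc : PySem.Chars.isalnum c = false := by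
            have := hmin 0 (Nat.succ_pos _); simpa using this
          simp only [pvLoopI, hc, Bool.false_eq_true, if_false]
          have := ih k' (by simpa using hk) (by simpa using hP)
            (fun m hm => by have := hmin (m + 1) (by omega); simpa using this)
          omega

theorem pvLoopJ_stop (cs : List Char) (i j : Nat) (h : ¬ i < j) : pvLoopJ cs i j = j := by
  cases j with
  | zero => rfl
  | succ j' => simp [pvLoopJ, h]

theorem pvLoopJ_last (cs : List Char) (i k : Nat)
    (hik : i ≤ k)
    (hP : PySem.Chars.isalnum (cs.getD k ' ') = true)
    (j : Nat) (hkj : k < j) (hj : j ≤ cs.length)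
    (hmax : ∀ m, k < m → m < j → PySem.Chars.isalnum (cs.getD m ' ') = false) :
    pvLoopJ cs i j = k + 1 := by
  induction j with
  | zero => omega
  | succ j' ih =>
      by_cases hjk : j' = k
      · subst hjk
        simp only [pvLoopJ, hP]
        rw [if_neg (by simp)]
      · have hk' : k < j' := by omega
        have hnp : PySem.Chars.isalnum (cs.getD j' ' ') = false :=
          hmax j' hk' (by omega)
        simp only [pvLoopJ, hnp]
        rw [if_pos ⟨by omega, by simp⟩]
        exact ih hk' (by omega) (fun m h1 h2 => hmax m h1 (by omega))

theorem mem_idx (cs : List Char) (k : Nat) :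
    k ∈ (List.range cs.length).filter (fun k => PySem.Chars.isalnum (cs.getD k ' ')) ↔
      k < cs.length ∧ PySem.Chars.isalnum (cs.getD k ' ') = true := by
  simp [List.mem_filter, List.mem_range]

theorem idx_sorted (cs : List Char) :
    ((List.range cs.length).filter (fun k => PySem.Chars.isalnum (cs.getD k ' '))).Pairwise (· < ·) :=
  (List.pairwise_lt_range).filter _

-- in a strictly increasing nonempty list, every member is at most the last element
theorem pairwise_le_getLastD (l : List Nat) (a : Nat)
    (h : (a :: l).Pairwise (· < ·)) : ∀ m ∈ a :: l, m ≤ l.getLastD a := by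
  induction l generalizing a with
  | nil => intro m hm; simp at hm; simp [hm]
  | cons b l' ih =>
      intro m hm
      have hb : ∀ m ∈ b :: l', m ≤ l'.getLastD b := ih b (h.sublist (by simp))
      rcases List.mem_cons.mp hm with rfl | hm
      · have hab : m < b := (List.rel_of_pairwise_cons h) (by simp)
        have := hb b (by simp)
        simp only [List.getLastD_cons]
        omega
      · simp only [List.getLastD_cons]
        exact hb m hm

-- the default-carrying last element is a member of default :: list
theorem getLastD_mem (l : List Nat) (a : Nat) : l.getLastD a ∈ a :: l := by
  induction l generalizing a with
  | nil => simp
  | cons b l' ih =>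
      simp only [List.getLastD_cons]
      exact List.mem_cons_of_mem _ (ih b)

theorem split_punct_eq (token : String) :
    split_punct_py token = split_punct_py_alt token := by
  unfold split_punct_py split_punct_py_alt
  dsimp only
  rcases hmatch : (List.range token.toList.length).filter
      (fun k => PySem.Chars.isalnum (token.toList.getD k ' ')) with _ | ⟨h, t⟩
  · -- no alphanumeric character: both return (token, "", "")
    have hall : ∀ c ∈ token.toList, PySem.Chars.isalnum c = false := by
      intro c hc
      rcases List.mem_iff_getElem.mp hc with ⟨m, hm, rfl⟩
      by_contra hb
      have hmm : m ∈ (List.range token.toList.length).filter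
          (fun k => PySem.Chars.isalnum (token.toList.getD k ' ')) :=
        (mem_idx token.toList m).mpr ⟨hm, by
          simp only [List.getD_eq_getElem?_getD, List.getElem?_eq_getElem hm, Option.getD_some]
          exact eq_true_of_ne_false hb⟩
      rw [hmatch] at hmm
      simp at hmm
    have hi : pvLoopI token.toList = token.toList.length := pvLoopI_all _ hall
    have hj : pvLoopJ token.toList (pvLoopI token.toList) token.toList.length
        = token.toList.length := by
      rw [hi]; exact pvLoopJ_stop _ _ _ (lt_irrefl _)
    rw [hj, hi]
    simp only [List.take_length, List.drop_length, String.ofList_toList]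
  · -- h is the least alphanumeric index, t.getLastD h the greatest
    have hsorted := idx_sorted token.toList
    rw [hmatch] at hsorted
    have hmemh : h ∈ (List.range token.toList.length).filter
        (fun k => PySem.Chars.isalnum (token.toList.getD k ' ')) := by rw [hmatch]; simp
    have hhead := (mem_idx token.toList h).mp hmemh
    have hmin : ∀ m < h, PySem.Chars.isalnum (token.toList.getD m ' ') = false := by
      intro m hm
      by_contra hb
      have hmem : m ∈ h :: t := by
        rw [← hmatch]
        exact (mem_idx token.toList m).mpr ⟨lt_trans hm hhead.1, eq_true_of_ne_false hb⟩
      rcases List.mem_cons.mp hmem with rfl | hmem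
      · omega
      · exact absurd (List.rel_of_pairwise_cons hsorted hmem) (by omega)
    have hle : ∀ m ∈ h :: t, m ≤ t.getLastD h := pairwise_le_getLastD t h hsorted
    have hmeml : t.getLastD h ∈ h :: t := getLastD_mem t h
    have hlast := (mem_idx token.toList (t.getLastD h)).mp (by rw [hmatch]; exact hmeml)
    have hmax : ∀ m, t.getLastD h < m → m < token.toList.length →
        PySem.Chars.isalnum (token.toList.getD m ' ') = false := by
      intro m h1 h2
      by_contra hb
      have : m ∈ h :: t := by
        rw [← hmatch]
        exact (mem_idx token.toList m).mpr ⟨h2, eq_true_of_ne_false hb⟩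
      exact absurd (hle m this) (by omega)
    have hi : pvLoopI token.toList = h := pvLoopI_first _ h hhead.1 hhead.2 hmin
    have hj : pvLoopJ token.toList (pvLoopI token.toList) token.toList.length
        = t.getLastD h + 1 := by
      rw [hi]
      exact pvLoopJ_last _ h (t.getLastD h) (hle h (by simp)) hlast.2 _ hlast.1 (le_refl _) hmax
    rw [hj, hi]

-- ===== VERDICT (by name: the statement is the Claim_ definition above) =====
theorem split_punct_py_spec : Claim_equal_split_punct_py := by
  intro token _
  unfold Spec_split_punct_py
  exact split_punct_eq token
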